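-- pv_equiv track=rewrite | github.com/petecarr/emulator | utilities/load_files.py | char_repr
-- ===== SOURCE A (Python) =====
-- def char_repr(membytes):
--     ret = ""
--     for i in range(len(membytes)):
--         if 32 <= membytes[i] <= 127:
--             bchar = chr(membytes[i])
--             if bchar.isprintable():
--                 ret += bchar
--             else:
--                 ret += '.'
--         else:
--             ret += '.'
--     return ret
-- ===== SOURCE B (Python) =====
-- # B: run-length segmentation — split input into maximal runs of printable (32-126)
-- # vs non-printable values, emit each printable run via one join(map(chr,...)) and
-- # each non-printable run via '.' * length, then join the segments.
-- def char_repr(membytes):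
--     segments = []
--     i, n = 0, len(membytes)
--     while i < n:
--         if 32 <= membytes[i] <= 126:
--             j = i
--             while j < n and 32 <= membytes[j] <= 126:
--                 j += 1
--             segments.append(''.join(map(chr, membytes[i:j])))
--         else:
--             j = i
--             while j < n and not (32 <= membytes[j] <= 126):
--                 j += 1
--             segments.append('.' * (j - i))
--         i = j
--     return ''.join(segments)
-- ===== Notes on version B (the rewrite author's own statement) =====
-- stated objective: alternative
-- what changed: Replaces the per-element index loop with inline branching by run-length segmentation: the input is split into maximal printable/non-printable runs, each printable run emitted as one join(map(chr,...)) and each non-printable run as '.' * length, then the segments are joined.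
import Mathlib
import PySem

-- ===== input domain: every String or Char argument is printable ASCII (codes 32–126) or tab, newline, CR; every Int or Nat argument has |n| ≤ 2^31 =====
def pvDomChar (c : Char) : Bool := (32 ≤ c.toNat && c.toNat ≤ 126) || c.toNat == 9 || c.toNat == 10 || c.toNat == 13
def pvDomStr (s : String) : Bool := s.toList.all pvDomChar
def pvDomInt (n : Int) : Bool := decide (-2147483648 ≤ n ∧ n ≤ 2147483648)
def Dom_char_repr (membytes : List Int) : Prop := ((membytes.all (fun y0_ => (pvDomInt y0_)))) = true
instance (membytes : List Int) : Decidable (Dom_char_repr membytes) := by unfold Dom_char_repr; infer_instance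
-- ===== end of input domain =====

-- B replaces A's per-element branch loop by run-length segmentation: maximal printable/non-printable runs, each emitted as one segment (alternative; same cost).


-- ===== PORT A =====
-- A's loop body: 32 <= b <= 127, bchar = chr(b); for b in that range, bchar.isprintable() is exactly b ≠ 127 (DEL)
def pvStepA (ret : String) (b : Int) : String :=
  if 32 ≤ b ∧ b ≤ 127 then
    if b ≠ 127 then ret ++ String.ofList [Char.ofNat b.toNat] else ret ++ "."
  else ret ++ "."

def char_repr (membytes : List Int) : String :=
  (PySem.List.pyRange 0 (membytes.length : Int) 1).foldl
    (fun ret i => pvStepA ret (PySem.List.pyGetD membytes i 0)) ""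

-- ===== PORT B =====
-- 32 <= b <= 126 (the run predicate)
def pvPr (b : Int) : Bool := decide (32 ≤ b ∧ b ≤ 126)

-- the inner while loops scan a maximal run (takeWhile) and advance i past it (dropWhile);
-- a printable run becomes ''.join(map(chr, run)), a non-printable run '.' * len(run)
def pvGo : List Int → List String
  | [] => []
  | b :: rest =>
    if pvPr b then
      PySem.Str.join "" (((b :: rest).takeWhile pvPr).map (fun x => String.ofList [Char.ofNat x.toNat]))
        :: pvGo ((b :: rest).dropWhile pvPr)
    else
      String.ofList (List.replicate ((b :: rest).takeWhile (fun x => !pvPr x)).length '.')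
        :: pvGo ((b :: rest).dropWhile (fun x => !pvPr x))
termination_by xs => xs.length
decreasing_by
  all_goals
    simp only [List.dropWhile_cons]
    split
    · exact Nat.lt_succ_of_le (List.length_dropWhile_le _ _)
    · simp_all

def char_repr_alt (membytes : List Int) : String :=
  PySem.Str.join "" (pvGo membytes)

-- ===== PRECONDITION & SPEC =====
def Spec_char_repr (membytes : List Int) (out : String) : Prop := out = char_repr_alt membytes
instance (membytes : List Int) (out : String) : Decidable (Spec_char_repr membytes out) := by unfold Spec_char_repr; infer_instance

-- ===== CLAIM (what is proved, stated in full; the proofs are below) =====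
def Claim_equal_char_repr : Prop := ∀ (membytes : List Int), Dom_char_repr membytes → Spec_char_repr membytes (char_repr membytes)

-- ===== LEMMAS AND PROOFS =====

-- the per-element value both sides realise
def pvF (b : Int) : String :=
  if pvPr b then String.ofList [Char.ofNat b.toNat] else "."

theorem join_empty_cons (p : String) (rest : List String) :
    PySem.Str.join "" (p :: rest) = p ++ PySem.Str.join "" rest := by
  cases rest with
  | nil =>
    apply String.ext
    simp [PySem.Str.toList_join, PySem.Chars.join_singleton, PySem.Chars.join_nil]
  | cons q r =>
    apply String.ext
    simp [PySem.Str.toList_join, PySem.Chars.join_cons_cons]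

theorem join_empty_append (L1 L2 : List String) :
    PySem.Str.join "" (L1 ++ L2) = PySem.Str.join "" L1 ++ PySem.Str.join "" L2 := by
  induction L1 with
  | nil =>
    simp only [List.nil_append]
    apply String.ext
    simp [PySem.Str.toList_join, PySem.Chars.join_nil]
  | cons x t ih =>
    simp only [List.cons_append, join_empty_cons, ih, String.append_assoc]

theorem join_replicate_dot (k : Nat) :
    PySem.Str.join "" (List.replicate k ".") = String.ofList (List.replicate k '.') := by
  induction k with
  | zero =>
    apply String.ext
    simp [PySem.Str.toList_join, PySem.Chars.join_nil]
  | succ n ih =>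
    rw [List.replicate_succ, join_empty_cons, ih, List.replicate_succ]
    apply String.ext
    simp

theorem foldl_append_join (g : Int → String) (xs : List Int) (s : String) :
    xs.foldl (fun ret b => ret ++ g b) s = s ++ PySem.Str.join "" (xs.map g) := by
  induction xs generalizing s with
  | nil =>
    apply String.ext
    simp [PySem.Str.toList_join, PySem.Chars.join_nil]
  | cons x t ih =>
    simp only [List.foldl_cons, List.map_cons, join_empty_cons, ih]
    rw [String.append_assoc]

theorem pvStepA_eq (ret : String) (b : Int) :
    pvStepA ret b = ret ++ pvF b := by
  unfold pvStepA pvF pvPr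
  by_cases h1 : 32 ≤ b ∧ b ≤ 126
  · rw [if_pos (show 32 ≤ b ∧ b ≤ 127 by omega), if_pos (show b ≠ 127 by omega)]
    simp [h1]
  · by_cases h2 : 32 ≤ b ∧ b ≤ 127
    · rw [if_pos h2, if_neg (show ¬ b ≠ 127 by omega)]
      simp [h1]
    · rw [if_neg h2]
      simp [h1]

-- A's value is the elementwise join
theorem char_repr_eq_join (xs : List Int) :
    char_repr xs = PySem.Str.join "" (xs.map pvF) := by
  unfold char_repr
  rw [PySem.List.foldl_pyRange_zero_pyGetD' xs 0 pvStepA ""]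
  rw [show pvStepA = (fun ret b => ret ++ pvF b)
    from funext fun r => funext fun b => pvStepA_eq r b]
  rw [foldl_append_join pvF xs ""]
  exact String.empty_append

-- B's run segmentation also yields the elementwise join
theorem pvGo_join (xs : List Int) :
    PySem.Str.join "" (pvGo xs) = PySem.Str.join "" (xs.map pvF) := by
  induction xs using pvGo.induct with
  | case1 => simp [pvGo]
  | case2 b rest h ih =>
    rw [pvGo, if_pos h, join_empty_cons, ih,
      ← join_empty_append,
      show ((b :: rest).takeWhile pvPr).map (fun x => String.ofList [Char.ofNat x.toNat])
          = ((b :: rest).takeWhile pvPr).map pvF from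
        List.map_congr_left (fun x hx => by
          simp [pvF, List.mem_takeWhile_imp hx]),
      ← List.map_append, List.takeWhile_append_dropWhile]
  | case3 b rest h ih =>
    have hrep : ((b :: rest).takeWhile (fun x => !pvPr x)).map pvF
        = List.replicate ((b :: rest).takeWhile (fun x => !pvPr x)).length "." := by
      have hmem : ∀ s ∈ ((b :: rest).takeWhile (fun x => !pvPr x)).map pvF, s = "." := by
        intro s hs
        obtain ⟨x, hx, rfl⟩ := List.mem_map.mp hs
        have hxp := List.mem_takeWhile_imp hx
        simp only [Bool.not_eq_eq_eq_not, Bool.not_true] at hxp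
        simp [pvF, hxp]
      simpa using List.eq_replicate_of_mem hmem
    rw [pvGo, if_neg h, join_empty_cons, ih, ← join_replicate_dot, ← hrep,
      ← join_empty_append, ← List.map_append, List.takeWhile_append_dropWhile]

-- ===== VERDICT (by name: the statement is the Claim_ definition above) =====
theorem char_repr_spec : Claim_equal_char_repr := by
  intro xs _
  unfold Spec_char_repr char_repr_alt
  rw [char_repr_eq_join, pvGo_join]
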